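-- pv_equiv track=rewrite | github.com/Rew93/codevars_task | code_vars_task/the_observed_pin.py | comb_for_5key
-- ===== SOURCE A (Python) =====
-- def comb_for_5key(num):
--     lst = []
--     for a in num[0]:
--         for b in num[1]:
--             for c in num[2]:
--                 for d in num[3]:
--                     for i in num[4]:
--                         lst.append(a + b + c + d + i)
--     return sorted(lst)
-- ===== SOURCE B (Python) =====
-- def comb_for_5key(num):
--     acc = list(num[0])
--     for k in range(1, 5):
--         if not acc:
--             break
--         acc = [x + y for x in acc for y in num[k]]
--     return sorted(acc)
-- ===== Notes on version B (the rewrite author's own statement) =====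
-- stated objective: alternative
-- what changed: Replaces the five hard-coded nested loops with a single fold over the remaining four key lists that grows an accumulator of partial concatenations (with an early break once the accumulator is empty, matching A's lazy access of later lists).
import Mathlib
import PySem

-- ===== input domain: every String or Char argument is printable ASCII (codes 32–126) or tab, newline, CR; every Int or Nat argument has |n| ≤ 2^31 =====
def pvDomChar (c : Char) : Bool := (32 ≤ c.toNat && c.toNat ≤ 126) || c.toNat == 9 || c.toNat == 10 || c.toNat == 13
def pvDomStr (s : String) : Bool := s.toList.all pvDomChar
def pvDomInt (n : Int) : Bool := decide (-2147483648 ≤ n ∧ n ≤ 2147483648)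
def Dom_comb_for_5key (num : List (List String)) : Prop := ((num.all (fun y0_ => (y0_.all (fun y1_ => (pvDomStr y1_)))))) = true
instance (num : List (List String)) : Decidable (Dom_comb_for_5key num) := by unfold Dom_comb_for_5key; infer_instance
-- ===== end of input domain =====

-- B replaces A's five hard-coded nested loops by one fold over the remaining key lists
-- that grows an accumulator of partial concatenations (alternative decomposition, same cost).


-- ===== PORT A =====
-- num[k] is ported as pyGetD num k []: inside Pre_ every index A actually evaluates is in
-- range (or the product is already empty), so the default is never observable there.
def comb_for_5key (num : List (List String)) : List String :=
  let lst :=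
    (PySem.List.pyGetD num 0 []).foldl (fun l1 a =>
      (PySem.List.pyGetD num 1 []).foldl (fun l2 b =>
        (PySem.List.pyGetD num 2 []).foldl (fun l3 c =>
          (PySem.List.pyGetD num 3 []).foldl (fun l4 d =>
            (PySem.List.pyGetD num 4 []).foldl (fun l5 i =>
              l5 ++ [a ++ b ++ c ++ d ++ i]) l4) l3) l2) l1) []
  PySem.List.sorted lst (fun x => x) false

-- ===== PORT B =====
-- [x + y for x in acc for y in lst]
def combStep (acc : List String) (lst : List String) : List String :=
  acc.flatMap (fun x => lst.map (fun y => x ++ y))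

-- 'for k in range(1, 5): if not acc: break; acc = [x + y for x in acc for y in num[k]]'
def combLoop (num : List (List String)) (acc : List String) : List Int → List String
  | [] => acc
  | k :: ks => if acc = [] then acc else combLoop num (combStep acc (PySem.List.pyGetD num k [])) ks

def comb_for_5key_alt (num : List (List String)) : List String :=
  PySem.List.sorted (combLoop num (PySem.List.pyGetD num 0 []) (PySem.List.pyRange 1 5 1))
    (fun x => x) false

-- ===== PRECONDITION & SPEC =====
-- Pre_ excludes exactly the inputs where A (and B) raise IndexError: fewer than five key
-- lists while every present list is nonempty, so the loops reach a missing index.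
def Pre_comb_for_5key (num : List (List String)) : Prop := 5 ≤ num.length ∨ [] ∈ num
instance (num : List (List String)) : Decidable (Pre_comb_for_5key num) := by
  unfold Pre_comb_for_5key; infer_instance

def pvWitness_comb_for_5key : List (List String) := [["a"], ["b", ""], ["c"], ["d"], ["e"]]

def Spec_comb_for_5key (num : List (List String)) (out : List String) : Prop := out = comb_for_5key_alt num
instance (num : List (List String)) (out : List String) : Decidable (Spec_comb_for_5key num out) := by unfold Spec_comb_for_5key; infer_instance

-- ===== CLAIM (what is proved, stated in full; the proofs are below) =====
def Claim_equal_comb_for_5key : Prop := ∀ (num : List (List String)), Dom_comb_for_5key num → Pre_comb_for_5key num → Spec_comb_for_5key num (comb_for_5key num)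

-- ===== LEMMAS AND PROOFS =====
theorem combStep_nil (l : List String) : combStep [] l = [] := rfl

theorem foldl_combStep_nil (num : List (List String)) (ks : List Int) :
    ks.foldl (fun a k => combStep a (PySem.List.pyGetD num k [])) [] = [] := by
  induction ks with
  | nil => rfl
  | cons k ks ih => simpa [combStep_nil] using ih

theorem combLoop_eq_foldl (num : List (List String)) (acc : List String) (ks : List Int) :
    combLoop num acc ks = ks.foldl (fun a k => combStep a (PySem.List.pyGetD num k [])) acc := by
  induction ks generalizing acc with
  | nil => rfl
  | cons k ks ih =>
    simp only [combLoop, List.foldl_cons]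
    by_cases h : acc = []
    · subst h
      rw [if_pos rfl, combStep_nil, foldl_combStep_nil]
    · rw [if_neg h, ih]

theorem comb_for_5key_spec : Claim_equal_comb_for_5key := by
  intro num _ _
  unfold Spec_comb_for_5key comb_for_5key comb_for_5key_alt
  rw [combLoop_eq_foldl]
  simp only [show PySem.List.pyRange 1 5 1 = [1, 2, 3, 4] from rfl, List.foldl_cons, List.foldl_nil]
  simp only [PySem.List.foldl_append_eq_flatMap]
  simp [combStep, List.flatMap_assoc, List.map_eq_flatMap, String.append_assoc]
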